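-- pv_equiv track=rewrite | github.com/miliar/Code_Jam_Webscraper | solutions_python/solutions_year15_round0_nr1/104.py | solve
-- ===== SOURCE A (Python) =====
-- def solve(shy_max, shy_levels):
--   shy_levels = list(map(int, shy_levels))
--   standing = 0
--   needed = 0
--   for level in range(shy_max + 1):
--     if shy_levels[level] > 0:
--       if standing < level:
--         needed += max(0, level - standing)
--         standing = level
--       standing += shy_levels[level]
--   return needed
-- ===== SOURCE B (Python) =====
-- def solve(shy_max, shy_levels):
--   counts = [int(shy_levels[level]) for level in range(shy_max + 1)]
--   total = sum(max(c, 0) for c in counts)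
--   best = 0
--   seen = 0
--   for level in reversed(range(shy_max + 1)):
--     c = counts[level]
--     seen += max(c, 0)
--     if c > 0:
--       best = max(best, level - (total - seen))
--   return best
-- ===== Notes on version B (the rewrite author's own statement) =====
-- stated objective: alternative
-- what changed: B replaces A's forward loop with the coupled standing/needed accumulators by three staged passes: materialise the counts, precompute the total of the positive counts, then sweep the levels in reverse keeping a suffix sum and taking the answer as a running maximum of the deficit level - (total - suffix).
import Mathlib
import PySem

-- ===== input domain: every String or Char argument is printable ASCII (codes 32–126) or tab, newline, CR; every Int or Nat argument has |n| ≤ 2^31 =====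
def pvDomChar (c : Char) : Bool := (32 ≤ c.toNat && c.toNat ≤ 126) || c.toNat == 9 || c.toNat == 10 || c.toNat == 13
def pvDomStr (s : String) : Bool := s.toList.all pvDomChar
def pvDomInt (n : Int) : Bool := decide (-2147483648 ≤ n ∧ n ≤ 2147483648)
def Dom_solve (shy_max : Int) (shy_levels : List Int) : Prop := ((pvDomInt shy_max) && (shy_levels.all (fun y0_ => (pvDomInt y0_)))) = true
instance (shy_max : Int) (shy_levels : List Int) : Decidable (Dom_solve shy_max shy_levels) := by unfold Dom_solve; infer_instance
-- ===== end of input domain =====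

-- B replaces A's forward standing/needed loop by staged passes: materialised counts, a
-- precomputed total of the positive counts, and a reverse sweep taking a running maximum
-- of the deficit level - (total - suffix); same cost, a different traversal.

-- ===== PORT A =====
-- step of A's loop body; state = (standing, needed)
def solveStepA (shy_levels : List Int) (st : Int × Int) (level : Int) : Int × Int :=
  let c := (PySem.List.pyGet? shy_levels level).getD 0
  if c > 0 then
    let standing1 := if st.1 < level then level else st.1
    let needed1 := if st.1 < level then st.2 + max 0 (level - st.1) else st.2
    (standing1 + c, needed1)
  else st

def solve (shy_max : Int) (shy_levels : List Int) : Int :=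
  ((PySem.List.pyRange 0 (shy_max + 1) 1).foldl (solveStepA shy_levels) (0, 0)).2

-- ===== PORT B =====
-- step of Source B's reverse loop; state = (best, seen)
def solveStepB (counts : List Int) (total : Int) (st : Int × Int) (level : Int) : Int × Int :=
  let c := PySem.List.pyGetD counts level 0
  let seen := st.2 + max c 0
  if c > 0 then (max st.1 (level - (total - seen)), seen) else (st.1, seen)

def solve_alt (shy_max : Int) (shy_levels : List Int) : Int :=
  let counts := (PySem.List.pyRange 0 (shy_max + 1) 1).map
    (fun level => (PySem.List.pyGet? shy_levels level).getD 0)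
  let total := (counts.map (fun c => max c 0)).sum
  (((PySem.List.pyRange 0 (shy_max + 1) 1).reverse).foldl (solveStepB counts total) (0, 0)).1

-- ===== PRECONDITION & SPEC =====
-- A indexes shy_levels[level] for level = 0..shy_max, so it raises IndexError unless
-- shy_max < len(shy_levels) (or the loop is empty, shy_max < 0); exactly those inputs are excluded.
def Pre_solve (shy_max : Int) (shy_levels : List Int) : Prop :=
  shy_max < 0 ∨ shy_max < (shy_levels.length : Int)
instance (shy_max : Int) (shy_levels : List Int) : Decidable (Pre_solve shy_max shy_levels) := by
  unfold Pre_solve; infer_instance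

def pvWitness_solve : Int × List Int := (2, [1, 0, 1])

def Spec_solve (shy_max : Int) (shy_levels : List Int) (out : Int) : Prop := out = solve_alt shy_max shy_levels
instance (shy_max : Int) (shy_levels : List Int) (out : Int) : Decidable (Spec_solve shy_max shy_levels out) := by unfold Spec_solve; infer_instance

-- ===== CLAIM (what is proved, stated in full; the proofs are below) =====
def Claim_equal_solve : Prop := ∀ (shy_max : Int) (shy_levels : List Int), Dom_solve shy_max shy_levels → Pre_solve shy_max shy_levels → Spec_solve shy_max shy_levels (solve shy_max shy_levels)

-- ===== LEMMAS AND PROOFS =====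
-- Common yardstick: maximum (clamped at 0 for the empty case) of level - prefix over the
-- positive entries of a counts list, walking it left to right.
def goMax (level pfx : Int) : List Int → Int
  | [] => 0
  | c :: cs =>
    if c > 0 then max (level - pfx) (goMax (level + 1) (pfx + c) cs)
    else goMax (level + 1) pfx cs

-- A-side: A's forward fold over the consecutive range [a, b) computes max n (goMax a p counts)
-- whenever standing = needed + prefix and 0 ≤ needed.
theorem solve_fold_link (shy_levels : List Int) :
    ∀ (k : Nat) (a b s n p : Int), (b - a).toNat = k → s = n + p → 0 ≤ n →
    ((PySem.List.pyRange a b 1).foldl (solveStepA shy_levels) (s, n)).2 =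
      max n (goMax a p ((PySem.List.pyRange a b 1).map
        (fun level => (PySem.List.pyGet? shy_levels level).getD 0))) := by
  intro k
  induction k with
  | zero =>
    intro a b s n p hk hs hn
    rw [PySem.List.pyRange_one, hk]
    simp [goMax]
    omega
  | succ k ih =>
    intro a b s n p hk hs hn
    have hba : a < b := by omega
    rw [PySem.List.pyRange_one_cons hba]
    simp only [List.foldl_cons, List.map_cons]
    by_cases hc : (PySem.List.pyGet? shy_levels a).getD 0 > 0
    · by_cases hlt : s < a
      · have hA : solveStepA shy_levels (s, n) a =
            (a + (PySem.List.pyGet? shy_levels a).getD 0, a - p) := by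
          simp only [solveStepA, hc, if_pos hlt, if_true]
          simp [Prod.ext_iff]
          omega
        rw [hA, ih (a + 1) b (a + (PySem.List.pyGet? shy_levels a).getD 0) (a - p)
          (p + (PySem.List.pyGet? shy_levels a).getD 0) (by omega) (by omega) (by omega)]
        simp only [goMax, if_pos hc]
        omega
      · have hA : solveStepA shy_levels (s, n) a =
            (s + (PySem.List.pyGet? shy_levels a).getD 0, n) := by
          simp [solveStepA, hc, hlt]
        rw [hA, ih (a + 1) b (s + (PySem.List.pyGet? shy_levels a).getD 0) n
          (p + (PySem.List.pyGet? shy_levels a).getD 0) (by omega) (by omega) hn]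
        simp only [goMax, if_pos hc]
        omega
    · have hA : solveStepA shy_levels (s, n) a = (s, n) := by simp [solveStepA, hc]
      rw [hA, ih (a + 1) b s n p (by omega) hs hn]
      simp only [goMax, if_neg hc]

-- goMax over a snoc: the appended entry sits at level l + cs.length with prefix p + Σ max(x,0).
theorem goMax_snoc (cs : List Int) : ∀ (l p c : Int),
    goMax l p (cs ++ [c]) =
      if c > 0 then
        max ((l + (cs.length : Int)) - (p + (cs.map (fun x => max x 0)).sum)) (goMax l p cs)
      else goMax l p cs := by
  induction cs with
  | nil =>
    intro l p c
    by_cases h : c > 0 <;> simp [goMax, h]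
  | cons x xs ih =>
    intro l p c
    by_cases hx : x > 0 <;>
      simp only [List.cons_append, goMax, if_pos, hx, ite_false, ih,
        List.length_cons, List.map_cons, List.sum_cons] <;>
      split_ifs <;> push_cast <;> omega

-- B-side: the reverse sweep starting at level m with suffix sum `seen` computes
-- max best (goMax 0 0 counts_{0..m}) whenever total - seen = Σ_{0..m} max(counts i, 0).
theorem solve_rev_link (counts : List Int) (total : Int) (f : Int → Int) :
    ∀ (k : Nat) (m best seen : Int), m + 1 = (k : Int) → 0 ≤ best →
    (∀ i : Int, 0 ≤ i → i ≤ m → PySem.List.pyGetD counts i 0 = f i) →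
    total - seen = (((PySem.List.pyRange 0 (m + 1) 1).map f).map (fun x => max x 0)).sum →
    (((PySem.List.pyRange 0 (m + 1) 1).reverse).foldl (solveStepB counts total) (best, seen)).1 =
      max best (goMax 0 0 ((PySem.List.pyRange 0 (m + 1) 1).map f)) := by
  intro k
  induction k with
  | zero =>
    intro m best seen hk hb _ _
    have h0 : (m + 1 - 0).toNat = 0 := by omega
    rw [PySem.List.pyRange_one, h0]
    simp [goMax, hb]
  | succ k ih =>
    intro m best seen hk hb hc hsum
    have hm : 0 ≤ m := by omega
    have hsplit : PySem.List.pyRange 0 (m + 1) 1 = PySem.List.pyRange 0 m 1 ++ [m] := by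
      rw [PySem.List.pyRange_one_succ_right (by omega)]
    rw [hsplit] at hsum ⊢
    simp only [List.reverse_append, List.reverse_singleton, List.singleton_append,
      List.foldl_cons, List.map_append, List.map_cons, List.map_nil, List.sum_append,
      List.sum_cons, List.sum_nil] at hsum ⊢
    have hcm : PySem.List.pyGetD counts m 0 = f m := hc m hm le_rfl
    rw [goMax_snoc]
    have hlen : (((PySem.List.pyRange 0 m 1).map f).length : Int) = m := by
      simp [PySem.List.length_pyRange_one]
      omega
    have hsum' : total - (seen + max (f m) 0) =
        (List.map (fun x => max x 0) (List.map f (PySem.List.pyRange 0 m 1))).sum := by omega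
    by_cases hfm : f m > 0
    · have hstep : solveStepB counts total (best, seen) m =
          (max best (m - (total - (seen + max (f m) 0))), seen + max (f m) 0) := by
        simp [solveStepB, hcm, hfm]
      have IH := ih (m - 1) (max best (m - (total - (seen + max (f m) 0))))
        (seen + max (f m) 0) (by omega) (by omega)
        (fun i h1 h2 => hc i h1 (by omega))
        (by rw [show (m : Int) - 1 + 1 = m by ring]; exact hsum')
      rw [show (m : Int) - 1 + 1 = m by ring] at IH
      rw [hstep, IH, if_pos hfm, hlen]
      omega
    · have hstep : solveStepB counts total (best, seen) m = (best, seen + max (f m) 0) := by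
        simp [solveStepB, hcm, hfm]
      have IH := ih (m - 1) best (seen + max (f m) 0) (by omega) hb
        (fun i h1 h2 => hc i h1 (by omega))
        (by rw [show (m : Int) - 1 + 1 = m by ring]; exact hsum')
      rw [show (m : Int) - 1 + 1 = m by ring] at IH
      rw [hstep, IH, if_neg hfm]

-- ===== VERDICT (by name: the statement is the Claim_ definition above) =====
theorem solve_spec : Claim_equal_solve := by
  intro shy_max shy_levels _ _
  unfold Spec_solve solve solve_alt
  rw [solve_fold_link shy_levels (shy_max + 1 - 0).toNat 0 (shy_max + 1) 0 0 0 rfl (by omega) le_rfl]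
  by_cases hm : -1 ≤ shy_max
  · rw [solve_rev_link _ _ _ (shy_max + 1).toNat shy_max 0 0 (by omega) le_rfl
      (fun i h1 h2 => by
        rw [PySem.List.pyGetD_map_pyRange_of_nonneg _ _ _ _ h1 (by omega)])
      (by simp [List.map_map])]
  · have h0 : (shy_max + 1 - 0).toNat = 0 := by omega
    rw [PySem.List.pyRange_one, h0]
    simp [goMax]
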